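-- pv_equiv track=rewrite | github.com/imatge-upc/danifojo-2018-repeatrnn | src_pytorch/addition.py | vec2num
-- ===== SOURCE A (Python) =====
-- def vec2num(x):
--     s = 0
--     for i in range(len(x)):
--         if x[i] == 10:
--             break
--         s *= 10
--         s += x[i]
--     return s
-- ===== SOURCE B (Python) =====
-- def vec2num(x):
--     try:
--         n = x.index(10)
--     except ValueError:
--         n = len(x)
--     acc = 0
--     p = 1
--     for d in reversed(x[:n]):
--         acc += d * p
--         p *= 10
--     return acc
-- ===== Notes on version B (the rewrite author's own statement) =====
-- stated objective: alternative
-- what changed: Two-phase positional sum: first locate the sentinel 10 with list.index, then sum digit*power-of-ten over the reversed prefix, instead of A's single Horner multiply-accumulate loop with a break.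
import Mathlib
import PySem

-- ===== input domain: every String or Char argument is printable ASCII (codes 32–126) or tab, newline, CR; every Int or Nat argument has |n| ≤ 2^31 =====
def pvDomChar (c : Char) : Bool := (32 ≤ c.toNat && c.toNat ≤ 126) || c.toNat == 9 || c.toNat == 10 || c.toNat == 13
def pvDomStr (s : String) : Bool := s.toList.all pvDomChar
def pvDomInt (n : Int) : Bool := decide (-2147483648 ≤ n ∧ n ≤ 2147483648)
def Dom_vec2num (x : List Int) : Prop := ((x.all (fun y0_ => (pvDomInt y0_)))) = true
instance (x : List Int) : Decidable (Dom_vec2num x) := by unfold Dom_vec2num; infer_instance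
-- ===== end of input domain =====

-- B computes the same value by a two-phase positional sum (find the sentinel index, then sum digit*10^position over the reversed prefix) instead of A's Horner loop with a break; objective: alternative decomposition.


-- ===== PORT A =====
-- loop 'for i in range(len(x)): if x[i]==10: break; s*=10; s+=x[i]' as structural recursion on the list with accumulator s
def vec2numGo (s : Int) : List Int → Int
  | [] => s
  | h :: t => if h = 10 then s else vec2numGo (s * 10 + h) t

def vec2num (x : List Int) : Int := vec2numGo 0 x

-- ===== PORT B =====
-- 'for d in reversed(x[:n]): acc += d*p; p *= 10' as recursion over the reversed prefix
def vec2numRevGo : List Int → Int → Int → Int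
  | [], acc, _ => acc
  | d :: t, acc, p => vec2numRevGo t (acc + d * p) (p * 10)

def vec2num_alt (x : List Int) : Int :=
  vec2numRevGo (x.take ((PySem.List.index? x 10).getD x.length)).reverse 0 1

-- ===== PRECONDITION & SPEC =====
def Spec_vec2num (x : List Int) (out : Int) : Prop := out = vec2num_alt x
instance (x : List Int) (out : Int) : Decidable (Spec_vec2num x out) := by unfold Spec_vec2num; infer_instance

-- ===== CLAIM (what is proved, stated in full; the proofs are below) =====
def Claim_equal_vec2num : Prop := ∀ (x : List Int), Dom_vec2num x → Spec_vec2num x (vec2num x)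

-- ===== LEMMAS AND PROOFS =====

-- polynomial value of a little-endian digit list
def polyLE : List Int → Int
  | [] => 0
  | d :: t => d + 10 * polyLE t

theorem revGo_eq (l : List Int) : ∀ acc p, vec2numRevGo l acc p = acc + p * polyLE l := by
  induction l with
  | nil => intro acc p; simp [vec2numRevGo, polyLE]
  | cons d t ih => intro acc p; simp [vec2numRevGo, polyLE, ih]; ring

theorem polyLE_append_singleton (l : List Int) (a : Int) :
    polyLE (l ++ [a]) = polyLE l + 10 ^ l.length * a := by
  induction l with
  | nil => simp [polyLE]
  | cons d t ih => simp [polyLE, ih]; ring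

theorem go_eq_acc (l : List Int) : ∀ s : Int,
    vec2numGo s l = s * 10 ^ (l.takeWhile (fun d => decide (d ≠ 10))).length
      + polyLE ((l.takeWhile (fun d => decide (d ≠ 10))).reverse) := by
  induction l with
  | nil => intro s; simp [vec2numGo, polyLE]
  | cons h t ih =>
    intro s
    by_cases hh : h = 10
    · simp [vec2numGo, hh, List.takeWhile_cons, polyLE]
    · rw [List.takeWhile_cons, if_pos (by simpa using hh)]
      simp only [vec2numGo, if_neg hh, List.length_cons, List.reverse_cons]
      rw [ih, polyLE_append_singleton, List.length_reverse]
      ring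

theorem take_index_eq_takeWhile (x : List Int) :
    x.take ((PySem.List.index? x 10).getD x.length) = x.takeWhile (fun d => decide (d ≠ 10)) := by
  induction x with
  | nil => simp
  | cons h t ih =>
    by_cases hh : h = 10
    · subst hh
      rw [PySem.List.index?_cons_self]
      simp [List.takeWhile]
    · rw [PySem.List.index?_cons_of_ne t hh]
      rw [List.takeWhile_cons, if_pos (by simpa using hh)]
      cases hidx : PySem.List.index? t 10 with
      | none =>
        simp only [hidx] at ih
        simp only [hidx, Option.map_none, Option.getD_none, List.length_cons,
          List.take_succ_cons]
        exact congrArg (List.cons h) (by simpa using ih)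
      | some k =>
        simp only [hidx] at ih
        simp only [hidx, Option.map_some, Option.getD_some, List.take_succ_cons]
        exact congrArg (List.cons h) ih

-- ===== VERDICT (by name: the statement is the Claim_ definition above) =====
theorem vec2num_spec : Claim_equal_vec2num := by
  intro x _
  unfold Spec_vec2num vec2num vec2num_alt
  rw [take_index_eq_takeWhile, revGo_eq, go_eq_acc]
  ring
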